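-- pv_equiv track=rewrite | github.com/lee95292/AlgoGaza | coding_test/2022kakaomobility/2.py | solution
-- ===== SOURCE A (Python) =====
-- def solution(id_list, k):
--     couponDict = {}
--     answer = 0
--     for dailyPurchaceList in id_list:
--         purchaces = list(set(dailyPurchaceList.split(" ")))
--         for p in purchaces:
--             if couponDict.get(p) == None:
--                 couponDict[p] = 1
--             else:
--                 couponDict[p] +=1
--     for coupKey in couponDict.keys():
--         if couponDict[coupKey] > k :
--             answer+=k
--         else:
--             answer += couponDict[coupKey]
--     return answer
-- ===== SOURCE B (Python) =====
-- def solution(id_list, k):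
--     pool = []
--     for day in id_list:
--         pool.extend(set(day.split(" ")))
--     pool.sort()
--     ans = 0
--     i = 0
--     n = len(pool)
--     while i < n:
--         # advance j past the maximal run of tokens equal to pool[i]
--         j = i + 1
--         while j < n and pool[j] == pool[i]:
--             j += 1
--         ans += min(j - i, k)
--         i = j
--     return ans
-- ===== Notes on version B (the rewrite author's own statement) =====
-- stated objective: alternative
-- what changed: Replaces the dict-counting pass and the keys iteration by pooling the per-day-deduplicated tokens into one list, sorting it, and summing min(run length, k) over maximal runs of equal tokens.
import Mathlib
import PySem

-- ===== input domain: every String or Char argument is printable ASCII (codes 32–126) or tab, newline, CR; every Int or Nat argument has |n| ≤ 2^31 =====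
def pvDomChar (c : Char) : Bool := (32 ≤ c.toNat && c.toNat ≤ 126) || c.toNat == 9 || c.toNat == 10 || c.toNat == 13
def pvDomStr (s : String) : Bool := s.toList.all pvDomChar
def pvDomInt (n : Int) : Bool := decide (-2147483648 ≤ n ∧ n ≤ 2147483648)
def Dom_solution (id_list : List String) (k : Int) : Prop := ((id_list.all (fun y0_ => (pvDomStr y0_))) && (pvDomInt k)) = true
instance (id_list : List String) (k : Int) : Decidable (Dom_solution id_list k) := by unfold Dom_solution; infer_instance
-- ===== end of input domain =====

-- B replaces A's dict-counting pass by pooling the per-day-deduplicated tokens, sorting the pool,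
-- and summing min(run length, k) over maximal runs of equal tokens (alternative algorithm, same cost class).

-- ===== PORT A =====
-- day.split(" "): sep is the non-empty literal " ", so PySem.Str.split? is always `some` and getD [] is exact
def solution (id_list : List String) (k : Int) : Int :=
  let couponDict : PySem.Dict String Int :=
    id_list.foldl (fun d dailyPurchaceList =>
      let purchaces : List String :=
        PySem.Set.ofList ((PySem.Str.split? dailyPurchaceList " ").getD [])
      purchaces.foldl (fun d p =>
        if d.get? p = none then d.insert p 1
        else d.insert p (d.getD p 0 + 1)) d)       -- couponDict[p] += 1 (key present in this branch)
      PySem.Dict.empty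
  couponDict.keys.foldl (fun answer coupKey =>
    if couponDict.getD coupKey 0 > k then answer + k
    else answer + couponDict.getD coupKey 0) 0     -- couponDict[coupKey] (key present)

-- ===== PORT B =====
-- Source B's outer while loop over runs, as structural recursion on the remaining suffix of pool:
-- the inner while advancing j past the run is takeWhile on the tail, the next suffix is dropWhile
def runSum (pool : List String) (k : Int) : Int :=
  match pool with
  | [] => 0
  | head :: rest =>
      min (((rest.takeWhile (fun y => y == head)).length : Int) + 1) k
        + runSum (rest.dropWhile (fun y => y == head)) k
termination_by pool.length
decreasing_by
  exact Nat.lt_succ_of_le (List.length_dropWhile_le _ _)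

def solution_alt (id_list : List String) (k : Int) : Int :=
  let pool : List String :=
    id_list.foldl (fun acc day =>
      acc ++ PySem.Set.ofList ((PySem.Str.split? day " ").getD [])) []
  runSum (PySem.List.sorted pool (fun x => x) false) k

-- ===== PRECONDITION & SPEC =====
def Spec_solution (id_list : List String) (k : Int) (out : Int) : Prop := out = solution_alt id_list k
instance (id_list : List String) (k : Int) (out : Int) : Decidable (Spec_solution id_list k out) := by unfold Spec_solution; infer_instance

-- ===== CLAIM (what is proved, stated in full; the proofs are below) =====
def Claim_equal_solution : Prop := ∀ (id_list : List String) (k : Int), Dom_solution id_list k → Spec_solution id_list k (solution id_list k)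

-- ===== LEMMAS AND PROOFS =====

-- the pooled list of per-day-deduplicated tokens, common to both closed forms
def pvPool (id_list : List String) : List String :=
  id_list.flatMap (fun day => PySem.Set.ofList ((PySem.Str.split? day " ").getD []))

-- closed form of A: sum of min(count, k) over the distinct elements of the pool
theorem solution_closed (id_list : List String) (k : Int) :
    solution id_list k
      = ∑ x ∈ (pvPool id_list).toFinset, min (((pvPool id_list).count x : Int)) k := by
  unfold solution
  have hstep : (fun (d : PySem.Dict String Int) (p : String) =>
        if d.get? p = none then d.insert p 1 else d.insert p (d.getD p 0 + 1))
      = fun d p => d.insert p (d.getD p 0 + 1) := by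
    funext d p
    by_cases h : d.get? p = none
    · rw [if_pos h, PySem.Dict.getD_of_get?_eq_none d 0 h]; norm_num
    · rw [if_neg h]
  rw [hstep]
  have hdict : id_list.foldl (fun d dailyPurchaceList =>
        (PySem.Set.ofList ((PySem.Str.split? dailyPurchaceList " ").getD [])).foldl
          (fun d p => d.insert p (d.getD p 0 + 1)) d) PySem.Dict.empty
      = PySem.Dict.counter (pvPool id_list) := by
    rw [← PySem.Dict.foldl_insert_getD_add_one_eq_counter, pvPool, List.foldl_flatMap]
  rw [hdict]
  have hbody : ∀ (ans c : Int),
      (if c > k then ans + k else ans + c) = ans + min c k := by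
    intro ans c
    rcases le_or_gt c k with h | h
    · rw [if_neg (not_lt.mpr h), min_eq_left h]
    · rw [if_pos h, min_eq_right (le_of_lt h)]
  calc (PySem.Dict.counter (pvPool id_list)).keys.foldl (fun ans key =>
          if (PySem.Dict.counter (pvPool id_list)).getD key 0 > k then ans + k
          else ans + (PySem.Dict.counter (pvPool id_list)).getD key 0) 0
      = (PySem.Dict.counter (pvPool id_list)).keys.foldl (fun ans key =>
          ans + min ((PySem.Dict.counter (pvPool id_list)).getD key 0) k) 0 := by
        exact PySem.List.foldl_congr_mem _ _ _ _
          (fun ans key _ => hbody ans ((PySem.Dict.counter (pvPool id_list)).getD key 0))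
    _ = ((PySem.Dict.counter (pvPool id_list)).keys.map
          (fun key => min ((PySem.Dict.counter (pvPool id_list)).getD key 0) k)).sum := by
        rw [PySem.List.foldl_add]; simp
    _ = ((PySem.List.dedup (pvPool id_list)).map
          (fun key => min (((pvPool id_list).count key : Int)) k)).sum := by
        rw [PySem.Dict.keys_counter, ← PySem.List.dedup_eq_ofList]
        congr 1
        exact List.map_congr_left (fun key _ => by rw [PySem.Dict.getD_counter])
    _ = ∑ x ∈ (PySem.List.dedup (pvPool id_list)).toFinset,
          min (((pvPool id_list).count x : Int)) k := by
        rw [List.sum_toFinset _ (PySem.List.nodup_dedup _)]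
    _ = ∑ x ∈ (pvPool id_list).toFinset, min (((pvPool id_list).count x : Int)) k := by
        congr 1
        ext y
        simp

-- the x-run of a ≤-sorted tail absorbs every copy of x: x does not survive the dropWhile
theorem not_mem_dropWhile_beq (x : String) (rest : List String)
    (hle : ∀ y ∈ rest, x ≤ y) (hs : rest.Pairwise (· ≤ ·)) :
    x ∉ rest.dropWhile (fun y => y == x) := by
  induction rest with
  | nil => simp
  | cons a l ih =>
      rw [List.dropWhile_cons]
      by_cases ha : (a == x) = true
      · rw [if_pos ha]
        exact ih (fun y hy => hle y (List.mem_cons_of_mem a hy)) (List.pairwise_cons.mp hs).2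
      · rw [if_neg ha]
        intro hx
        have hax : a ≠ x := by simpa using ha
        rcases List.mem_cons.mp hx with h | h
        · exact hax h.symm
        · have h1 : a ≤ x := (List.pairwise_cons.mp hs).1 x h
          have h2 : x ≤ a := hle a (List.mem_cons_self)
          exact hax (le_antisymm h1 h2)

-- runSum on a ≤-sorted list computes the same sum of min(count, k)
theorem runSum_sorted (k : Int) :
    ∀ (n : Nat) (l : List String), l.length ≤ n → l.Pairwise (· ≤ ·) →
      runSum l k = ∑ x ∈ l.toFinset, min ((l.count x : Int)) k := by
  intro n
  induction n with
  | zero =>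
      intro l hlen _
      have : l = [] := List.eq_nil_of_length_eq_zero (Nat.le_zero.mp hlen)
      subst this
      simp [runSum]
  | succ n ih =>
      intro l hlen hsorted
      match l with
      | [] => simp [runSum]
      | x :: rest =>
        set run := rest.takeWhile (fun y => y == x) with hrun
        set rest' := rest.dropWhile (fun y => y == x) with hrest'
        have hsplit : run ++ rest' = rest := List.takeWhile_append_dropWhile
        have hrunx : ∀ y ∈ run, y = x := by
          intro y hy
          have := List.mem_takeWhile_imp hy
          simpa using this
        have hxle : ∀ y ∈ rest, x ≤ y := by
          intro y hy
          exact (List.pairwise_cons.mp hsorted).1 y hy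
        have hrest'sub : rest'.Sublist rest := List.dropWhile_sublist _
        have hrest'sorted : rest'.Pairwise (· ≤ ·) :=
          ((List.pairwise_cons.mp hsorted).2).sublist hrest'sub
        have hxnot : x ∉ rest' :=
          not_mem_dropWhile_beq x rest hxle (List.pairwise_cons.mp hsorted).2
        have hcountx : (x :: rest).count x = run.length + 1 := by
          rw [← hsplit]
          have h1 : run.count x = run.length :=
            List.count_eq_length.mpr (fun b hb => (hrunx b hb).symm)
          have h2 : rest'.count x = 0 := List.count_eq_zero.mpr hxnot
          simp [List.count_append, h1, h2]
        have hcounty : ∀ y ∈ rest', (x :: rest).count y = rest'.count y := by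
          intro y hy
          have hyx : y ≠ x := fun h => hxnot (h ▸ hy)
          have h1 : run.count y = 0 := by
            rw [List.count_eq_zero]
            intro hmem
            exact hyx (hrunx y hmem)
          rw [← hsplit]
          simp [List.count_append, h1, Ne.symm hyx]
        have hfin : (x :: rest).toFinset = insert x rest'.toFinset := by
          ext y
          simp only [List.mem_toFinset, List.mem_cons, Finset.mem_insert]
          constructor
          · rintro (h | h)
            · exact Or.inl h
            · rw [← hsplit] at h
              rcases List.mem_append.mp h with h | h
              · exact Or.inl (hrunx y h)
              · exact Or.inr (by simpa using h)
          · rintro (h | h)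
            · exact Or.inl h
            · refine Or.inr ?_
              rw [← hsplit]
              exact List.mem_append.mpr (Or.inr (by simpa using h))
        have hlen' : rest'.length ≤ n := by
          have h1 : rest'.length ≤ rest.length := List.length_dropWhile_le _ _
          have h2 : rest.length + 1 ≤ n + 1 := by simpa using hlen
          omega
        have hIH := ih rest' hlen' hrest'sorted
        have hxninfin : x ∉ rest'.toFinset := by
          simpa [List.mem_toFinset] using hxnot
        calc runSum (x :: rest) k
            = min ((run.length : Int) + 1) k + runSum rest' k := by
              rw [runSum]
          _ = min (((x :: rest).count x : Int)) k
              + ∑ y ∈ rest'.toFinset, min ((rest'.count y : Int)) k := by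
              rw [hIH, hcountx]; push_cast; ring_nf
          _ = min (((x :: rest).count x : Int)) k
              + ∑ y ∈ rest'.toFinset, min (((x :: rest).count y : Int)) k := by
              congr 1
              exact Finset.sum_congr rfl (fun y hy => by
                rw [hcounty y (List.mem_toFinset.mp hy)])
          _ = ∑ y ∈ insert x rest'.toFinset, min (((x :: rest).count y : Int)) k := by
              rw [Finset.sum_insert hxninfin]
          _ = ∑ y ∈ (x :: rest).toFinset, min (((x :: rest).count y : Int)) k := by
              rw [hfin]

-- closed form of B: the same sum
theorem solution_alt_closed (id_list : List String) (k : Int) :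
    solution_alt id_list k
      = ∑ x ∈ (pvPool id_list).toFinset, min (((pvPool id_list).count x : Int)) k := by
  unfold solution_alt
  have hpool : id_list.foldl (fun acc day =>
        acc ++ PySem.Set.ofList ((PySem.Str.split? day " ").getD [])) []
      = pvPool id_list := by
    rw [PySem.List.foldl_append_eq_flatMap, pvPool]; rfl
  rw [hpool]
  set s := PySem.List.sorted (pvPool id_list) (fun x => x) false with hs
  have hperm : s.Perm (pvPool id_list) := PySem.List.sorted_perm _ _ _
  have hsorted : s.Pairwise (· ≤ ·) := by
    have := PySem.List.sorted_pairwise (pvPool id_list) (fun x => x)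
    simpa using this
  rw [runSum_sorted k s.length s (le_refl _) hsorted]
  have hfin : s.toFinset = (pvPool id_list).toFinset := by
    ext y
    simp [List.mem_toFinset, hperm.mem_iff]
  rw [hfin]
  exact Finset.sum_congr rfl (fun y _ => by rw [hperm.count_eq])

-- ===== VERDICT (by name: the statement is the Claim_ definition above) =====
theorem solution_spec : Claim_equal_solution := by
  intro id_list k _
  unfold Spec_solution
  rw [solution_closed, solution_alt_closed]
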